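-- pv_equiv track=rewrite | github.com/Shaw214/HKU | p4.py | get_sorted_index
-- ===== SOURCE A (Python) =====
-- def get_sorted_index(num):
--     ans = []
--     for i in range(len(num)):
--         max_num = -float('inf')
--         max_num_index = -1
--         for j in range(len(num)):
--             if max_num < num[j] and j not in ans:
--                 max_num = num[j]
--                 max_num_index = j
--         ans.append(max_num_index)
--     return ans
-- ===== SOURCE B (Python) =====
-- def get_sorted_index(num):
--     return sorted(range(len(num)), key=lambda i: (-num[i], i))
-- ===== Notes on version B (the rewrite author's own statement) =====
-- stated objective: faster
-- what changed: Replaces the quadratic selection scan (repeatedly rescanning the whole list with a 'not in ans' membership test) by a single stable sort of the index range under the lexicographic key (-value, index).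
import Mathlib
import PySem

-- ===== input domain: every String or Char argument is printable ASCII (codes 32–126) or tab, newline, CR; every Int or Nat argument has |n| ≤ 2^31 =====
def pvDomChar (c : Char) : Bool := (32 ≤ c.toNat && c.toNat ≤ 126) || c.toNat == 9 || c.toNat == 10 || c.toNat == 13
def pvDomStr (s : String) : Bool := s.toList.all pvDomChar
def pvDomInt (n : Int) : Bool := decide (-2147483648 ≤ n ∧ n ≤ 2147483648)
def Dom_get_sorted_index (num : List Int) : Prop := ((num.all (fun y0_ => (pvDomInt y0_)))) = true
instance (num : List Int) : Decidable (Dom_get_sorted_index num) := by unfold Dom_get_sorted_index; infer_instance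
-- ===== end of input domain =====

-- B replaces A's selection scan (n full rescans with a linear 'not in ans' test)
-- by one stable sort of the index range under the lexicographic key (-value, index).


-- ===== PORT A =====
-- num[j]: j is always drawn from range(len(num)), so the index is in range and the default is never used
def pvGet (num : List Int) (j : Int) : Int := PySem.List.pyGetD num j 0

-- max_num starts as -float('inf'); modelled exactly as `none`, which is < every int
def pvNegInfLt (mn : Option Int) (v : Int) : Bool :=
  match mn with
  | none => true
  | some m => decide (m < v)

-- inner loop body: 'if max_num < num[j] and j not in ans: max_num = num[j]; max_num_index = j'
def pvSelStep (num ans : List Int) (s : Option Int × Int) (j : Int) : Option Int × Int :=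
  if pvNegInfLt s.1 (pvGet num j) && !(decide (j ∈ ans)) then (some (pvGet num j), j) else s

-- inner 'for j in range(len(num))' loop, returning max_num_index (initially -1)
def pvSelect (num ans : List Int) : Int :=
  ((PySem.List.pyRange 0 (num.length : Int)).foldl (pvSelStep num ans) (none, -1)).2

def get_sorted_index (num : List Int) : List Int :=
  (PySem.List.pyRange 0 (num.length : Int)).foldl (fun ans _i => ans ++ [pvSelect num ans]) []

-- ===== PORT B =====
-- sorted(range(len(num)), key=lambda i: (-num[i], i))
def get_sorted_index_alt (num : List Int) : List Int :=
  PySem.List.sorted2 (PySem.List.pyRange 0 (num.length : Int)) (fun i => -(pvGet num i)) (fun i => i)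

-- ===== PRECONDITION & SPEC =====
def Spec_get_sorted_index (num : List Int) (out : List Int) : Prop := out = get_sorted_index_alt num
instance (num : List Int) (out : List Int) : Decidable (Spec_get_sorted_index num out) := by unfold Spec_get_sorted_index; infer_instance

-- ===== CLAIM (what is proved, stated in full; the proofs are below) =====
def Claim_equal_get_sorted_index : Prop := ∀ (num : List Int), Dom_get_sorted_index num → Spec_get_sorted_index num (get_sorted_index num)

-- ===== LEMMAS AND PROOFS =====

-- the lexicographic sort key of B, as a single Lex value
def pvKey (num : List Int) (i : Int) : Lex (Int × Int) := toLex (-(pvGet num i), i)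

-- B's two-component sort is the one-key sort under the Lex pair
theorem pv_sorted2_toLex (xs : List Int) (k1 k2 : Int → Int) :
    PySem.List.sorted2 xs k1 k2 = PySem.List.sorted xs (fun x => toLex (k1 x, k2 x)) := by
  rw [PySem.List.sorted_eq_foldl_insertBy, PySem.List.sorted2]
  simp only [Bool.false_eq_true, if_false]
  congr 1
  funext acc x
  congr 1
  funext a b
  simp only [Prod.Lex.lt_iff]
  by_cases h1 : k1 a < k1 b <;> by_cases h2 : k1 b < k1 a <;>
    simp [h1, h2] <;> omega

theorem pvKey_lt_iff (num : List Int) (a b : Int) :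
    pvKey num a < pvKey num b ↔
      (pvGet num b < pvGet num a ∨ (pvGet num a = pvGet num b ∧ a < b)) := by
  simp only [pvKey, Prod.Lex.lt_iff, ofLex_toLex]
  constructor
  · rintro (h | ⟨h1, h2⟩)
    · exact Or.inl (by omega)
    · exact Or.inr ⟨by omega, h2⟩
  · rintro (h | ⟨h1, h2⟩)
    · exact Or.inl (by omega)
    · exact Or.inr ⟨by omega, h2⟩

theorem pv_range_pairwise (n : Nat) :
    (PySem.List.pyRange 0 (n : Int)).Pairwise (· < ·) := by
  rw [PySem.List.pyRange_zero_natCast]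
  exact (List.pairwise_lt_range).map _ (fun a b h => by exact_mod_cast h)

theorem pv_range_nodup (n : Nat) : (PySem.List.pyRange 0 (n : Int)).Nodup :=
  (pv_range_pairwise n).imp (fun h => ne_of_lt h)

theorem pvSelStep_some_pos (num ans : List Int) (c j : Int)
    (h1 : pvGet num c < pvGet num j) (h2 : j ∉ ans) :
    pvSelStep num ans (some (pvGet num c), c) j = (some (pvGet num j), j) := by
  simp [pvSelStep, pvNegInfLt, h1, h2]

theorem pvSelStep_some_neg (num ans : List Int) (c j : Int)
    (h : ¬ (pvGet num c < pvGet num j ∧ j ∉ ans)) :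
    pvSelStep num ans (some (pvGet num c), c) j = (some (pvGet num c), c) := by
  by_cases h1 : pvGet num c < pvGet num j
  · have h2 : j ∈ ans := by tauto
    simp [pvSelStep, pvNegInfLt, h2]
  · simp [pvSelStep, pvNegInfLt, h1]

-- the inner scan, once a candidate c (with its own value) has been installed
theorem pv_inner_some (num ans : List Int) :
    ∀ (l : List Int) (c : Int), l.Pairwise (· < ·) → (∀ j ∈ l, c < j) → c ∉ ans →
    (l.foldl (pvSelStep num ans) (some (pvGet num c), c)).2 ∉ ans ∧
    ((l.foldl (pvSelStep num ans) (some (pvGet num c), c)).2 = c ∨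
      (l.foldl (pvSelStep num ans) (some (pvGet num c), c)).2 ∈ l) ∧
    (l.foldl (pvSelStep num ans) (some (pvGet num c), c)) =
      (some (pvGet num (l.foldl (pvSelStep num ans) (some (pvGet num c), c)).2),
       (l.foldl (pvSelStep num ans) (some (pvGet num c), c)).2) ∧
    pvGet num c ≤ pvGet num (l.foldl (pvSelStep num ans) (some (pvGet num c), c)).2 ∧
    (pvGet num c = pvGet num (l.foldl (pvSelStep num ans) (some (pvGet num c), c)).2 →
      (l.foldl (pvSelStep num ans) (some (pvGet num c), c)).2 = c) ∧
    (∀ j ∈ l, j ∉ ans →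
      pvGet num j ≤ pvGet num (l.foldl (pvSelStep num ans) (some (pvGet num c), c)).2 ∧
      (pvGet num j = pvGet num (l.foldl (pvSelStep num ans) (some (pvGet num c), c)).2 →
        (l.foldl (pvSelStep num ans) (some (pvGet num c), c)).2 ≤ j)) := by
  intro l
  induction l with
  | nil =>
    intro c _ _ hc
    simp [List.foldl, hc]
  | cons j t ih =>
    intro c hpw hlt hc
    rw [List.pairwise_cons] at hpw
    obtain ⟨hjt, hpt⟩ := hpw
    have hcj : c < j := hlt j (by simp)
    by_cases hsel : pvGet num c < pvGet num j ∧ j ∉ ans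
    · -- j is selected
      obtain ⟨hclt, hjans⟩ := hsel
      obtain ⟨i1, i2, i3, i4, i5, i6⟩ := ih j hpt hjt hjans
      simp only [List.foldl_cons, pvSelStep_some_pos num ans c j hclt hjans]
      refine ⟨i1, ?_, i3, le_of_lt (lt_of_lt_of_le hclt i4), ?_, ?_⟩
      · rcases i2 with h | h
        · exact Or.inr (by simp [h])
        · exact Or.inr (by simp [h])
      · intro heq
        exact absurd heq (ne_of_lt (lt_of_lt_of_le hclt i4))
      · intro x hx hxans
        rcases List.mem_cons.mp hx with rfl | hx'
        · exact ⟨i4, fun h => le_of_eq (i5 h)⟩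
        · exact i6 x hx' hxans
    · -- state kept
      obtain ⟨i1, i2, i3, i4, i5, i6⟩ := ih c hpt (fun x hx => lt_trans hcj (hjt x hx)) hc
      simp only [List.foldl_cons, pvSelStep_some_neg num ans c j hsel]
      refine ⟨i1, ?_, i3, i4, i5, ?_⟩
      · rcases i2 with h | h
        · exact Or.inl h
        · exact Or.inr (List.mem_cons_of_mem _ h)
      · intro x hx hxans
        rcases List.mem_cons.mp hx with rfl | hx'
        · have hxle : pvGet num x ≤ pvGet num c := by
            by_contra hgt
            exact hsel ⟨lt_of_not_ge hgt, hxans⟩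
          refine ⟨hxle.trans i4, ?_⟩
          intro heq
          have hce : pvGet num c = pvGet num _ := le_antisymm i4 (heq ▸ hxle)
          rw [i5 hce]
          exact le_of_lt hcj
        · exact i6 x hx' hxans

-- the inner scan from the initial state (-inf, -1)
theorem pv_inner_none (num ans : List Int) :
    ∀ (l : List Int), l.Pairwise (· < ·) →
    ((∀ j ∈ l, j ∈ ans) ∧ l.foldl (pvSelStep num ans) (none, -1) = (none, -1)) ∨
    ((l.foldl (pvSelStep num ans) (none, -1)).2 ∈ l ∧
     (l.foldl (pvSelStep num ans) (none, -1)).2 ∉ ans ∧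
     (∀ j ∈ l, j ∉ ans →
        pvGet num j ≤ pvGet num (l.foldl (pvSelStep num ans) (none, -1)).2 ∧
        (pvGet num j = pvGet num (l.foldl (pvSelStep num ans) (none, -1)).2 →
          (l.foldl (pvSelStep num ans) (none, -1)).2 ≤ j))) := by
  intro l
  induction l with
  | nil => exact fun _ => Or.inl ⟨by simp, rfl⟩
  | cons j t ih =>
    intro hpw
    rw [List.pairwise_cons] at hpw
    obtain ⟨hjt, hpt⟩ := hpw
    by_cases hjans : j ∈ ans
    · have hstep : pvSelStep num ans (none, (-1 : Int)) j = (none, -1) := by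
        simp [pvSelStep, hjans]
      rcases ih hpt with ⟨h1, h2⟩ | ⟨h1, h2, h3⟩
      · exact Or.inl ⟨by
          intro x hx
          rcases List.mem_cons.mp hx with rfl | hx'
          · exact hjans
          · exact h1 x hx', by simp only [List.foldl_cons, hstep]; exact h2⟩
      · refine Or.inr ?_
        simp only [List.foldl_cons, hstep]
        refine ⟨List.mem_cons_of_mem _ h1, h2, ?_⟩
        intro x hx hxans
        rcases List.mem_cons.mp hx with rfl | hx'
        · exact absurd hjans hxans
        · exact h3 x hx' hxans
    · have hstep : pvSelStep num ans (none, (-1 : Int)) j = (some (pvGet num j), j) := by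
        simp [pvSelStep, pvNegInfLt, hjans]
      obtain ⟨i1, i2, i3, i4, i5, i6⟩ := pv_inner_some num ans t j hpt hjt hjans
      refine Or.inr ?_
      simp only [List.foldl_cons, hstep]
      refine ⟨?_, i1, ?_⟩
      · rcases i2 with h | h
        · simp [h]
        · exact List.mem_cons_of_mem _ h
      · intro x hx hxans
        rcases List.mem_cons.mp hx with rfl | hx'
        · exact ⟨i4, fun h => le_of_eq (i5 h)⟩
        · exact i6 x hx' hxans

-- what one outer-loop iteration appends
theorem pv_select_spec (num ans : List Int)
    (h : ∃ j ∈ PySem.List.pyRange 0 (num.length : Int), j ∉ ans) :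
    pvSelect num ans ∈ PySem.List.pyRange 0 (num.length : Int) ∧
    pvSelect num ans ∉ ans ∧
    (∀ j ∈ PySem.List.pyRange 0 (num.length : Int), j ∉ ans →
      pvGet num j ≤ pvGet num (pvSelect num ans) ∧
      (pvGet num j = pvGet num (pvSelect num ans) → pvSelect num ans ≤ j)) := by
  rcases pv_inner_none num ans _ (pv_range_pairwise num.length) with ⟨hall, _⟩ | ⟨h1, h2, h3⟩
  · rcases h with ⟨j, hj, hjn⟩; exact absurd (hall j hj) hjn
  · exact ⟨h1, h2, h3⟩

-- the outer-loop invariant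
def pvOutInv (num ans : List Int) : Prop :=
  ans.Nodup ∧ (∀ a ∈ ans, a ∈ PySem.List.pyRange 0 (num.length : Int)) ∧
  ans.Pairwise (fun a b => pvKey num a < pvKey num b) ∧
  (∀ a ∈ ans, ∀ q ∈ PySem.List.pyRange 0 (num.length : Int), q ∉ ans → pvKey num a < pvKey num q)

theorem pv_outer (num : List Int) :
    ∀ (l ans : List Int), pvOutInv num ans →
      ans.length + l.length = (PySem.List.pyRange 0 (num.length : Int)).length →
      pvOutInv num (l.foldl (fun a _ => a ++ [pvSelect num a]) ans) ∧
      (l.foldl (fun a _ => a ++ [pvSelect num a]) ans).length =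
        (PySem.List.pyRange 0 (num.length : Int)).length := by
  intro l
  induction l with
  | nil =>
    intro ans hinv hlen
    exact ⟨hinv, by simpa using hlen⟩
  | cons x t ih =>
    intro ans hinv hlen
    obtain ⟨hnd, hsub, hpw, h4⟩ := hinv
    have hex : ∃ j ∈ PySem.List.pyRange 0 (num.length : Int), j ∉ ans := by
      by_contra hno
      push Not at hno
      have hsub2 : PySem.List.pyRange 0 (num.length : Int) ⊆ ans := fun j hj => hno j hj
      have := (List.subperm_of_subset (pv_range_nodup num.length) hsub2).length_le
      simp only [List.length_cons] at hlen
      omega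
    obtain ⟨s1, s2, s3⟩ := pv_select_spec num ans hex
    set p := pvSelect num ans with hp
    have hinv' : pvOutInv num (ans ++ [p]) := by
      refine ⟨?_, ?_, ?_, ?_⟩
      · simp only [List.nodup_append]
        refine ⟨hnd, by simp, ?_⟩
        intro a ha b hbm
        rw [List.mem_singleton] at hbm
        subst hbm
        exact fun h => s2 (h ▸ ha)
      · intro a ha
        rcases List.mem_append.mp ha with h | h
        · exact hsub a h
        · simp at h; exact h ▸ s1
      · rw [List.pairwise_append]
        refine ⟨hpw, by simp, ?_⟩
        intro a ha b hb
        simp only [List.mem_singleton] at hb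
        exact hb ▸ h4 a ha p s1 s2
      · intro a ha q hq hqn
        have hqa : q ∉ ans := fun h => hqn (List.mem_append.mpr (Or.inl h))
        have hqp : q ≠ p := fun h => hqn (List.mem_append.mpr (Or.inr (by simp [h])))
        rcases List.mem_append.mp ha with h | h
        · exact h4 a h q hq hqa
        · simp only [List.mem_singleton] at h
          subst h
          rw [pvKey_lt_iff]
          obtain ⟨hle, htie⟩ := s3 q hq hqa
          rcases lt_or_eq_of_le hle with hlt | heq
          · exact Or.inl hlt
          · exact Or.inr ⟨heq.symm, lt_of_le_of_ne (htie heq) (Ne.symm hqp)⟩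
    have hlen' : (ans ++ [p]).length + t.length = (PySem.List.pyRange 0 (num.length : Int)).length := by
      simp only [List.length_cons] at hlen
      simp only [List.length_append, List.length_singleton]
      omega
    simpa using ih (ans ++ [p]) hinv' hlen'

-- ===== VERDICT (by name: the statement is the Claim_ definition above) =====
theorem get_sorted_index_spec : Claim_equal_get_sorted_index := by
  intro num _
  unfold Spec_get_sorted_index
  have hinv : pvOutInv num [] := ⟨List.nodup_nil, by simp, List.Pairwise.nil, by simp⟩
  obtain ⟨⟨hnd, hsub, hpw, _⟩, hlen⟩ :=
    pv_outer num (PySem.List.pyRange 0 (num.length : Int)) [] hinv (by simp)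
  have hperm : (get_sorted_index num).Perm (PySem.List.pyRange 0 (num.length : Int)) := by
    have h1 : List.Subperm (get_sorted_index num) (PySem.List.pyRange 0 (num.length : Int)) :=
      List.subperm_of_subset hnd hsub
    exact h1.perm_of_length_le (le_of_eq hlen.symm)
  rw [get_sorted_index_alt, pv_sorted2_toLex]
  exact (PySem.List.sorted_eq_of_perm_of_pairwise_lt _ _ (pvKey num) hperm hpw).symm
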